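-- pv_equiv track=rewrite | github.com/suomisim/Python | Week 3/w3getGuessedWord.py | getGuessedWord
-- ===== SOURCE A (Python) =====
-- secretWord = 'apple'
--
-- lettersGuessed = ['e', 'i', 'k', 'p', 'r', 's']
--
-- def getGuessedWord(secretWord, lettersGuessed):
--     '''
--     secretWord: string, the word the user is guessing
--     lettersGuessed: list, what letters have been guessed so far
--     returns: string, comprised of letters and underscores that represents
--       what letters in secretWord have been guessed so far.
--     '''
--     outputWord = []
--     for char in secretWord:
--         if char in lettersGuessed:
--             outputWord.append(char)
--         else:
--             outputWord.append("_ ")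
--     return ''.join(outputWord)
-- ===== SOURCE B (Python) =====
-- def getGuessedWord(secretWord, lettersGuessed):
--     guessed = set(lettersGuessed)
--     table = {ord(c): '_ ' for c in secretWord if c not in guessed}
--     return secretWord.translate(table)
-- ===== Notes on version B (the rewrite author's own statement) =====
-- stated objective: faster
-- what changed: Replaces the per-character append loop (which scans lettersGuessed with a list 'in' test for every character) with a precomputed set of guesses plus an ord-keyed str.translate table applied in one pass; guessed letters are kept because they are absent from the table.
import Mathlib
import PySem

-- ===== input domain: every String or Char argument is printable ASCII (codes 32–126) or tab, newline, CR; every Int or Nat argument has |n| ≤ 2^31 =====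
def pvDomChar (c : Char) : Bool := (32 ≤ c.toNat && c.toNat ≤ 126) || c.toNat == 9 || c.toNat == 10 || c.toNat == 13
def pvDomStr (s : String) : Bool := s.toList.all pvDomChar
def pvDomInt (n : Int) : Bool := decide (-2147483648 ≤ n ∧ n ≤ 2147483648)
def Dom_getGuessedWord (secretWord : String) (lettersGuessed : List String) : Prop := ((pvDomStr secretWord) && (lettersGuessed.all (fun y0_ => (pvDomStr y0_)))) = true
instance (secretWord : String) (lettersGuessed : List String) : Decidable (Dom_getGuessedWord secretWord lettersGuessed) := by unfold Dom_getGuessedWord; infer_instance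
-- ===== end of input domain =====

-- B replaces A's per-character append loop (a list-membership scan per character) by a guessed-set
-- plus an ord-keyed str.translate table applied in one pass; same result, measurably faster.


-- ===== PORT A =====
-- literal port: build outputWord as a list of strings, appending char-or-placeholder, then ''.join
def getGuessedWord (secretWord : String) (lettersGuessed : List String) : String :=
  let outputWord := secretWord.toList.foldl
    (fun acc c =>
      if String.ofList [c] ∈ lettersGuessed then acc ++ [String.ofList [c]]
      else acc ++ ["_ "]) []
  PySem.Str.join "" outputWord

-- ===== PORT B =====
-- table = {ord(c): '_ ' for c in secretWord if c not in guessed}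
def pvTable (secretWord : String) (guessed : PySem.Set String) : PySem.Dict Int String :=
  secretWord.toList.foldl
    (fun d c =>
      if String.ofList [c] ∈ guessed then d
      else d.insert ((c.toNat : Int)) "_ ") PySem.Dict.empty

-- secretWord.translate(table): each char is replaced by table[ord(c)] when present, kept otherwise
def pvTranslate (s : String) (table : PySem.Dict Int String) : String :=
  String.ofList (s.toList.flatMap (fun c =>
    match table.get? ((c.toNat : Int)) with
    | some r => r.toList
    | none => [c]))

def getGuessedWord_alt (secretWord : String) (lettersGuessed : List String) : String :=
  pvTranslate secretWord (pvTable secretWord (PySem.Set.ofList lettersGuessed))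

-- ===== PRECONDITION & SPEC =====
def Spec_getGuessedWord (secretWord : String) (lettersGuessed : List String) (out : String) : Prop := out = getGuessedWord_alt secretWord lettersGuessed
instance (secretWord : String) (lettersGuessed : List String) (out : String) : Decidable (Spec_getGuessedWord secretWord lettersGuessed out) := by unfold Spec_getGuessedWord; infer_instance

-- ===== CLAIM (what is proved, stated in full; the proofs are below) =====
def Claim_equal_getGuessedWord : Prop := ∀ (secretWord : String) (lettersGuessed : List String), Dom_getGuessedWord secretWord lettersGuessed → Spec_getGuessedWord secretWord lettersGuessed (getGuessedWord secretWord lettersGuessed)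

-- ===== LEMMAS AND PROOFS =====

theorem pv_ord_inj (c a : Char) : ((c.toNat : Int) = (a.toNat : Int)) ↔ c = a := by
  rw [Int.natCast_inj]
  exact eq_iff_eq_of_cmp_eq_cmp rfl

-- what the table-building fold yields at key ord c
theorem pvTable_fold_get? (guessed : PySem.Set String) (l : List Char)
    (d : PySem.Dict Int String) (c : Char) :
    (l.foldl (fun d c' =>
        if String.ofList [c'] ∈ guessed then d
        else d.insert ((c'.toNat : Int)) "_ ") d).get? ((c.toNat : Int)) =
      if c ∈ l ∧ String.ofList [c] ∉ guessed then some "_ " else d.get? ((c.toNat : Int)) := by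
  induction l generalizing d with
  | nil => simp
  | cons a t ih =>
    simp only [List.foldl_cons, ih]
    by_cases hg : String.ofList [a] ∈ guessed
    · simp only [hg, if_pos]
      by_cases hca : c = a
      · subst hca
        simp [hg]
      · by_cases ht : c ∈ t ∧ String.ofList [c] ∉ guessed
        · simp [List.mem_cons, ht.1, ht.2]
        · have hcons : ¬ (c ∈ a :: t ∧ String.ofList [c] ∉ guessed) := by
            intro ⟨hm, hn⟩
            rcases List.mem_cons.mp hm with h | h
            · exact hca h
            · exact ht ⟨h, hn⟩
          rw [if_neg ht, if_neg hcons]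
    · simp only [hg, if_neg, not_false_iff]
      by_cases ht : c ∈ t ∧ String.ofList [c] ∉ guessed
      · simp [List.mem_cons, ht.1, ht.2]
      · rw [if_neg ht, PySem.Dict.get?_insert]
        by_cases hca : c = a
        · subst hca
          simp [hg]
        · have hk : ¬ ((c.toNat : Int) = (a.toNat : Int)) := fun h => hca ((pv_ord_inj c a).mp h)
          have hcons : ¬ (c ∈ a :: t ∧ String.ofList [c] ∉ guessed) := by
            intro ⟨hm, hn⟩
            rcases List.mem_cons.mp hm with h | h
            · exact hca h
            · exact ht ⟨h, hn⟩
          rw [if_neg hk, if_neg hcons]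

theorem pvTable_get? (secretWord : String) (lettersGuessed : List String) (c : Char)
    (hc : c ∈ secretWord.toList) :
    (pvTable secretWord (PySem.Set.ofList lettersGuessed)).get? ((c.toNat : Int)) =
      if String.ofList [c] ∈ lettersGuessed then none else some "_ " := by
  unfold pvTable
  rw [pvTable_fold_get?]
  by_cases hg : String.ofList [c] ∈ lettersGuessed
  · have h1 : ¬ (String.ofList [c] ∉ PySem.Set.ofList lettersGuessed) := by
      simp [PySem.Set.mem_ofList, hg]
    simp [hg]
  · have h1 : String.ofList [c] ∉ PySem.Set.ofList lettersGuessed := by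
      simp [PySem.Set.mem_ofList, hg]
    simp [hc, hg, h1]

theorem pv_intercalate_nil (ls : List (List Char)) : List.intercalate ([] : List Char) ls = ls.flatten := by
  simp [List.intercalate]
  induction ls with
  | nil => simp
  | cons a t ih => cases t <;> simp_all [List.intersperse]

-- ===== VERDICT (by name: the statement is the Claim_ definition above) =====
theorem getGuessedWord_spec : Claim_equal_getGuessedWord := by
  intro secretWord lettersGuessed _
  unfold Spec_getGuessedWord getGuessedWord getGuessedWord_alt pvTranslate
  have hstep : (fun (acc : List String) (c : Char) =>
      if String.ofList [c] ∈ lettersGuessed then acc ++ [String.ofList [c]]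
      else acc ++ ["_ "]) = fun acc c =>
      acc ++ [if String.ofList [c] ∈ lettersGuessed then String.ofList [c] else "_ "] := by
    funext acc c; split <;> rfl
  rw [hstep, PySem.List.foldl_append_singleton_eq_map]
  simp only [List.nil_append, PySem.Str.join, PySem.Chars.join, List.map_map,
    List.flatMap_def]
  rw [show ("" : String).toList = ([] : List Char) from rfl, pv_intercalate_nil]
  congr 1
  congr 1
  apply List.map_congr_left
  intro c hc
  rw [Function.comp_apply, pvTable_get? secretWord lettersGuessed c hc]
  by_cases hg : String.ofList [c] ∈ lettersGuessed <;> simp [hg]
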